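-- pv_equiv track=rewrite | github.com/dhymarbun/hackerrank_dips | Buku Tebal.py | BukuTebal
-- ===== SOURCE A (Python) =====
-- def Konso(e,L):
--     return [e] + L
--
-- def FirstElmt(L):
--     return L[0]
--
-- def LastElmt(L):
--     return L[-1]
--
-- def Tail(L):
--     return L[1:]
--
-- def isOneElmt(S):
--     return len(S) == 1
--
-- def BukuTebal(daftar_buku):
--     if isOneElmt(daftar_buku):
--         return FirstElmt(daftar_buku)
--     else:
--         buku_pertama = FirstElmt(daftar_buku)
--         buku_tebal = BukuTebal(Tail(daftar_buku))
--
--         if LastElmt(Konso(LastElmt(buku_pertama), [])) >= LastElmt(Konso(LastElmt(buku_tebal), [])):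
--             return buku_pertama
--         else:
--             return buku_tebal
-- ===== SOURCE B (Python) =====
-- def BukuTebal(daftar_buku):
--     best = daftar_buku[0]
--     for b in daftar_buku[1:]:
--         if b[-1] > best[-1]:
--             best = b
--     return best
-- ===== Notes on version B (the rewrite author's own statement) =====
-- stated objective: simpler
-- what changed: Replaces the structural recursion through five helper functions (Konso/FirstElmt/LastElmt/Tail/isOneElmt) with a single left-to-right loop keeping the current best book, updating only on a strictly larger last element so the earliest book still wins ties.
import Mathlib
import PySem

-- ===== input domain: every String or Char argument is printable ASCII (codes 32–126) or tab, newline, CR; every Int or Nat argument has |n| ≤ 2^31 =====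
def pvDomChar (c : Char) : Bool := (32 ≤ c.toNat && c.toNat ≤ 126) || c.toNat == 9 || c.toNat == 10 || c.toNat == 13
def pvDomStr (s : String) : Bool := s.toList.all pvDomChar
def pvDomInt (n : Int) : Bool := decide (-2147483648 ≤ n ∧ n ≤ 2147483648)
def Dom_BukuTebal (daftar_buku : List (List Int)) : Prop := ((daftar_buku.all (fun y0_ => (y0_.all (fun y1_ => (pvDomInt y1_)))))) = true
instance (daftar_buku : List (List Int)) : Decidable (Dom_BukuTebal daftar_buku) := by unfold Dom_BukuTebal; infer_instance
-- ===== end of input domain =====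

-- B replaces A's helper-based structural recursion by one linear loop over the list
-- keeping the current best book (strict > on updates keeps the earliest on ties): simpler.


-- ===== PORT A =====
-- Konso(e, L) = [e] + L
def Konso (e : Int) (L : List Int) : List Int := e :: L
-- FirstElmt(L) = L[0]; default [] stands where Python raises IndexError (excluded by Pre_)
def FirstElmt (L : List (List Int)) : List Int := (PySem.List.pyGet? L 0).getD []
-- LastElmt(L) = L[-1]; default 0 stands where Python raises IndexError (excluded by Pre_)
def LastElmt (L : List Int) : Int := (PySem.List.pyGet? L (-1)).getD 0
-- isOneElmt(S) = len(S) == 1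
def isOneElmt (S : List (List Int)) : Bool := S.length == 1

def BukuTebal : List (List Int) → List Int
  | [] => []    -- Python raises IndexError here (FirstElmt of []); excluded by Pre_
  | x :: rest =>
    if isOneElmt (x :: rest) then FirstElmt (x :: rest)
    else
      let buku_pertama := FirstElmt (x :: rest)
      let buku_tebal := BukuTebal rest    -- Tail(daftar_buku) = rest
      if LastElmt (Konso (LastElmt buku_pertama) []) ≥ LastElmt (Konso (LastElmt buku_tebal) [])
      then buku_pertama else buku_tebal

-- ===== PORT B =====
-- b[-1]; default 0 stands where Python raises IndexError (excluded by Pre_)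
def pyLast (b : List Int) : Int := (PySem.List.pyGet? b (-1)).getD 0

def BukuTebal_alt (daftar_buku : List (List Int)) : List Int :=
  match daftar_buku with
  | [] => []    -- Python raises IndexError here (daftar_buku[0]); excluded by Pre_
  | best :: rest => rest.foldl (fun best b => if pyLast b > pyLast best then b else best) best

-- ===== PRECONDITION & SPEC =====
-- Pre_ excludes exactly the inputs where Python A raises IndexError: the empty list,
-- and (when there is more than one book) a book that is itself empty (B raises there too).
def Pre_BukuTebal (daftar_buku : List (List Int)) : Prop :=
  daftar_buku ≠ [] ∧ (daftar_buku.length = 1 ∨ ∀ b ∈ daftar_buku, b ≠ [])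
instance (daftar_buku : List (List Int)) : Decidable (Pre_BukuTebal daftar_buku) := by unfold Pre_BukuTebal; infer_instance

def pvWitness_BukuTebal : List (List Int) := [[1, 2], [3, 4], [0, 4]]

def Spec_BukuTebal (daftar_buku : List (List Int)) (out : List Int) : Prop := out = BukuTebal_alt daftar_buku
instance (daftar_buku : List (List Int)) (out : List Int) : Decidable (Spec_BukuTebal daftar_buku out) := by unfold Spec_BukuTebal; infer_instance

-- ===== CLAIM (what is proved, stated in full; the proofs are below) =====
def Claim_equal_BukuTebal : Prop := ∀ (daftar_buku : List (List Int)), Dom_BukuTebal daftar_buku → Pre_BukuTebal daftar_buku → Spec_BukuTebal daftar_buku (BukuTebal daftar_buku)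

-- ===== LEMMAS AND PROOFS =====

-- abbreviation for B's loop (used only in the proofs)
def lft (a : List Int) (l : List (List Int)) : List Int :=
  l.foldl (fun best b => if pyLast b > pyLast best then b else best) a

theorem lft_nil (a : List Int) : lft a [] = a := rfl

theorem lft_cons (a x : List Int) (t : List (List Int)) :
    lft a (x :: t) = lft (if pyLast x > pyLast a then x else a) t := rfl

theorem FirstElmt_cons (x : List Int) (l : List (List Int)) : FirstElmt (x :: l) = x := by
  simp [FirstElmt, PySem.List.pyGet?_zero_cons]

theorem LastElmt_singleton (e : Int) : LastElmt [e] = e := by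
  simp [LastElmt, PySem.List.pyGet?_neg_one]

-- the loop's best never decreases and dominates everything seen
theorem le_lft (a : List Int) (l : List (List Int)) : pyLast a ≤ pyLast (lft a l) := by
  induction l generalizing a with
  | nil => simp [lft_nil]
  | cons x t ih =>
    rw [lft_cons]
    by_cases h : pyLast x > pyLast a
    · simp only [h, if_pos]
      exact le_of_lt (lt_of_lt_of_le h (ih x))
    · simp only [h, if_neg]
      exact ih a

theorem mem_le_lft (a : List Int) (l : List (List Int)) :
    ∀ x ∈ l, pyLast x ≤ pyLast (lft a l) := by
  induction l generalizing a with
  | nil => intro x hx; simp at hx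
  | cons y t ih =>
    intro x hx
    rw [lft_cons]
    rcases List.mem_cons.mp hx with hx | hx
    · subst hx
      by_cases h : pyLast x > pyLast a
      · simpa [h] using le_lft x t
      · simp only [h, if_neg]
        exact le_trans (not_lt.mp h) (le_lft a t)
    · by_cases h : pyLast y > pyLast a
      · simpa [h] using ih y x hx
      · simpa [h] using ih a x hx

-- if the seed dominates the whole list, the loop returns the seed
theorem lft_of_dom (a : List Int) (l : List (List Int))
    (h : ∀ x ∈ l, pyLast x ≤ pyLast a) : lft a l = a := by
  induction l with
  | nil => rfl
  | cons x t ih =>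
    rw [lft_cons]
    have hx : ¬ pyLast x > pyLast a := not_lt.mpr (h x (by simp))
    simp only [hx, if_neg]
    exact ih (fun y hy => h y (by simp [hy]))

-- two seeds both strictly below the loop's result give the same result
theorem lft_seed_irrel (l : List (List Int)) :
    ∀ a b : List Int, pyLast a < pyLast (lft a l) → pyLast b < pyLast (lft a l) →
    lft b l = lft a l := by
  induction l with
  | nil => intro a b h1 _; simp [lft_nil] at h1
  | cons x t ih =>
    intro a b h1 h2
    rw [lft_cons a x t] at h1 h2
    rw [lft_cons b x t, lft_cons a x t]
    by_cases hxa : pyLast x > pyLast a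
    · rw [if_pos hxa] at h1 h2 ⊢
      by_cases hxb : pyLast x > pyLast b
      · rw [if_pos hxb]
      · rw [if_neg hxb]
        exact ih x b (lt_of_le_of_lt (not_lt.mp hxb) h2) h2
    · rw [if_neg hxa] at h1 h2 ⊢
      by_cases hxb : pyLast x > pyLast b
      · rw [if_pos hxb]
        exact ih a x h1 (lt_of_le_of_lt (not_lt.mp hxa) h1)
      · rw [if_neg hxb]
        exact ih a b h1 h2

-- A on a nonempty list computes B's left loop
theorem bukuTebal_eq_lft (l : List (List Int)) :
    ∀ a : List Int, BukuTebal (a :: l) = lft a l := by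
  induction l with
  | nil => intro a; simp [BukuTebal, isOneElmt, FirstElmt_cons, lft_nil]
  | cons x t ih =>
    intro a
    have hA : BukuTebal (a :: x :: t) =
        if pyLast a ≥ pyLast (BukuTebal (x :: t)) then a else BukuTebal (x :: t) := by
      show (if isOneElmt (a :: x :: t) then FirstElmt (a :: x :: t)
            else if LastElmt (Konso (LastElmt (FirstElmt (a :: x :: t))) [])
                   ≥ LastElmt (Konso (LastElmt (BukuTebal (x :: t))) [])
                 then FirstElmt (a :: x :: t) else BukuTebal (x :: t)) = _
      simp only [isOneElmt, Konso, FirstElmt_cons, LastElmt_singleton]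
      norm_num [pyLast, LastElmt]
    rw [hA, ih x]
    by_cases h : pyLast a ≥ pyLast (lft x t)
    · rw [if_pos h, lft_cons]
      have hxa : ¬ pyLast x > pyLast a := not_lt.mpr (le_trans (le_lft x t) h)
      rw [if_neg hxa]
      exact (lft_of_dom a t (fun y hy => le_trans (mem_le_lft x t y (by simp [hy])) h)).symm
    · rw [if_neg h, lft_cons]
      push Not at h
      by_cases hxa : pyLast x > pyLast a
      · rw [if_pos hxa]
      · rw [if_neg hxa]
        exact (lft_seed_irrel t x a (lt_of_le_of_lt (not_lt.mp hxa) h) h).symm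

-- ===== VERDICT (by name: the statement is the Claim_ definition above) =====
theorem BukuTebal_spec : Claim_equal_BukuTebal := by
  intro daftar_buku _ hpre
  unfold Spec_BukuTebal
  cases daftar_buku with
  | nil => exact absurd rfl hpre.1
  | cons a t => exact bukuTebal_eq_lft t a
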